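-- pv_equiv track=rewrite | github.com/cristiansap/FreeRTOS-custom-scheduler | scripts/debug.py | task_interrupt_ratio
-- ===== SOURCE A (Python) =====
-- def task_interrupt_ratio(events):
--     task = 0
--     interrupt = 0
--     for start, name, end in events:
--         if name not in ("PendSV", "SysTick"):
--             task += end - start
--         else:
--             interrupt += end - start
--     return task, interrupt, task + interrupt
-- ===== SOURCE B (Python) =====
-- def task_interrupt_ratio(events):
--     per = {}
--     for start, name, end in events:
--         per[name] = per.get(name, 0) + (end - start)
--     interrupt = per.get("PendSV", 0) + per.get("SysTick", 0)
--     total = sum(per.values())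
--     return total - interrupt, interrupt, total
-- ===== Notes on version B (the rewrite author's own statement) =====
-- stated objective: alternative
-- what changed: B groups durations into a per-name dictionary in a branch-free pass and then aggregates: interrupt is read off the two interrupt keys, total is the sum of all dictionary values, task is total minus interrupt; A instead branches per event into two disjoint accumulators.
import Mathlib
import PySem

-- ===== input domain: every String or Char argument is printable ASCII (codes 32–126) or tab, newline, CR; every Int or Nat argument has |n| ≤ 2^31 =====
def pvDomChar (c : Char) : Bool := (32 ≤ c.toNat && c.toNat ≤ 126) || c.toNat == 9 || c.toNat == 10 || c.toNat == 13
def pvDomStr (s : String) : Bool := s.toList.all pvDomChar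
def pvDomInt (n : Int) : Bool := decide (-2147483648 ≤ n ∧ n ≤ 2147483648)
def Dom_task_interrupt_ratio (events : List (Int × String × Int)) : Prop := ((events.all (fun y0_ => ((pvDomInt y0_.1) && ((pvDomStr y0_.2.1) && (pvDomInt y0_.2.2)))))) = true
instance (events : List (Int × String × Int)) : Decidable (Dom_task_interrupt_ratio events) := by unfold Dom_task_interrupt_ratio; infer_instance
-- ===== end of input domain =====

-- B groups durations into a per-name dictionary in one branch-free pass and then
-- aggregates (interrupt from the two interrupt keys, total from all values, task by
-- subtraction) instead of A's per-event branching into two accumulators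
-- (objective: alternative algorithm via a different data structure, same O(n)).
-- Per the PySem convention, string equality is taken on .toList (exact, kernel-reducible).

-- ===== PORT A =====
-- Literal port of A: one fold over events with two accumulators (task, interrupt).
def task_interrupt_ratio (events : List (Int × String × Int)) : Int × Int × Int :=
  let p := events.foldl (fun (acc : Int × Int) e =>
    let (start, name, fin) := e
    if ¬ (name.toList = "PendSV".toList ∨ name.toList = "SysTick".toList)
    then (acc.1 + (fin - start), acc.2)
    else (acc.1, acc.2 + (fin - start))) (0, 0)
  (p.1, p.2, p.1 + p.2)

-- ===== PORT B =====
-- Port of B: per-name duration dict (per[name] = per.get(name,0)+(end-start) is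
-- Dict.modify), then interrupt from the two keys, total = sum of the values.
def task_interrupt_ratio_alt (events : List (Int × String × Int)) : Int × Int × Int :=
  let per := events.foldl
    (fun (d : PySem.Dict (List Char) Int) e => d.modify e.2.1.toList 0 (· + (e.2.2 - e.1)))
    PySem.Dict.empty
  let interrupt := per.getD "PendSV".toList 0 + per.getD "SysTick".toList 0
  let total := per.values.sum
  (total - interrupt, interrupt, total)

-- ===== PRECONDITION & SPEC =====
def Spec_task_interrupt_ratio (events : List (Int × String × Int)) (out : Int × Int × Int) : Prop := out = task_interrupt_ratio_alt events
instance (events : List (Int × String × Int)) (out : Int × Int × Int) : Decidable (Spec_task_interrupt_ratio events out) := by unfold Spec_task_interrupt_ratio; infer_instance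

-- ===== CLAIM (what is proved, stated in full; the proofs are below) =====
def Claim_equal_task_interrupt_ratio : Prop := ∀ (events : List (Int × String × Int)), Dom_task_interrupt_ratio events → Spec_task_interrupt_ratio events (task_interrupt_ratio events)

-- ===== LEMMAS =====
-- per-name filtered duration sum
def pvF (l : List (Int × String × Int)) (k : List Char) : Int :=
  ((l.filter (fun e => e.2.1.toList == k)).map (fun e => e.2.2 - e.1)).sum

lemma pvF_cons (e : Int × String × Int) (l : List (Int × String × Int)) (k : List Char) :
    pvF (e :: l) k = if e.2.1.toList = k then (e.2.2 - e.1) + pvF l k else pvF l k := by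
  by_cases h : e.2.1.toList = k <;> simp [pvF, h]

-- B's dict lookup is the per-name filtered sum
lemma getD_fold (l : List (Int × String × Int)) (d : PySem.Dict (List Char) Int) (k : List Char) :
    (l.foldl (fun (d : PySem.Dict (List Char) Int) e => d.modify e.2.1.toList 0 (· + (e.2.2 - e.1))) d).getD k 0
      = d.getD k 0 + pvF l k := by
  induction l generalizing d with
  | nil => simp [pvF]
  | cons e rest ih =>
    rw [List.foldl_cons, ih, pvF_cons, PySem.Dict.getD_modify]
    by_cases h : k = e.2.1.toList
    · simp [h]; ring
    · simp [h, eq_comm]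

lemma sum_map_ite_mem {α : Type} [DecidableEq α] (ks : List α) (a : α) (x : Int) (g : α → Int)
    (hnd : ks.Nodup) (ha : a ∈ ks) :
    (ks.map (fun k => if a = k then x + g k else g k)).sum = x + (ks.map g).sum := by
  induction ks with
  | nil => simp at ha
  | cons b ks ih =>
    rcases List.mem_cons.mp ha with h | h
    · subst h
      have hnot : a ∉ ks := (List.nodup_cons.mp hnd).1
      have : (ks.map (fun k => if a = k then x + g k else g k)) = ks.map g := by
        apply List.map_congr_left
        intro y hy
        have : a ≠ y := fun h => hnot (h ▸ hy)
        simp [this]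
      simp [this]
      ring
    · have hab : a ≠ b := by
        rintro rfl; exact (List.nodup_cons.mp hnd).1 h
      rw [List.map_cons, List.map_cons, List.sum_cons, List.sum_cons,
        ih (List.nodup_cons.mp hnd).2 h, if_neg hab]
      ring

-- partition: summing the per-name sums over a complete duplicate-free key list gives the total
lemma partition_sum (l : List (Int × String × Int)) (ks : List (List Char))
    (hnd : ks.Nodup) (hcov : ∀ e ∈ l, e.2.1.toList ∈ ks) :
    (ks.map (fun k => pvF l k)).sum = (l.map (fun e => e.2.2 - e.1)).sum := by
  induction l with
  | nil => simp [pvF]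
  | cons e rest ih =>
    have hmem : e.2.1.toList ∈ ks := hcov e (List.mem_cons_self ..)
    have : (ks.map (fun k => pvF (e :: rest) k))
        = ks.map (fun k => if e.2.1.toList = k then (e.2.2 - e.1) + pvF rest k else pvF rest k) := by
      apply List.map_congr_left; intro y _; rw [pvF_cons]
    rw [this, sum_map_ite_mem ks e.2.1.toList _ _ hnd hmem,
      ih (fun x hx => hcov x (List.mem_cons_of_mem _ hx))]
    simp

-- A's fold in closed form: (total − interrupt-part, interrupt-part)
lemma foldl_pair (events : List (Int × String × Int)) (t i : Int) :
    events.foldl (fun (acc : Int × Int) e =>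
      let (start, name, fin) := e
      if ¬ (name.toList = "PendSV".toList ∨ name.toList = "SysTick".toList)
      then (acc.1 + (fin - start), acc.2)
      else (acc.1, acc.2 + (fin - start))) (t, i)
    = (t + ((events.map (fun e => e.2.2 - e.1)).sum
            - (pvF events "PendSV".toList + pvF events "SysTick".toList)),
       i + (pvF events "PendSV".toList + pvF events "SysTick".toList)) := by
  induction events generalizing t i with
  | nil => simp [pvF]
  | cons e rest ih =>
    obtain ⟨start, name, fin⟩ := e
    rw [List.foldl_cons]
    by_cases h : name.toList = "PendSV".toList ∨ name.toList = "SysTick".toList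
    · simp only [h, not_true_eq_false, if_false]
      rw [ih, pvF_cons, pvF_cons]
      rcases h with h | h
      · have h2 : ¬ (name.toList = "SysTick".toList) := by rw [h]; decide
        rw [if_pos h, if_neg h2]
        simp only [List.map_cons, List.sum_cons, Prod.mk.injEq]
        exact ⟨by ring, by ring⟩
      · have h2 : ¬ (name.toList = "PendSV".toList) := by rw [h]; decide
        rw [if_pos h, if_neg h2]
        simp only [List.map_cons, List.sum_cons, Prod.mk.injEq]
        exact ⟨by ring, by ring⟩
    · simp only [h, not_false_eq_true, if_true]
      rw [ih, pvF_cons, pvF_cons]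
      rw [not_or] at h
      simp only [h.1, h.2, if_false, List.map_cons, List.sum_cons, Prod.mk.injEq]
      exact ⟨by ring, by trivial⟩

-- B in closed form
lemma alt_closed (events : List (Int × String × Int)) :
    task_interrupt_ratio_alt events
      = ((events.map (fun e => e.2.2 - e.1)).sum
            - (pvF events "PendSV".toList + pvF events "SysTick".toList),
         pvF events "PendSV".toList + pvF events "SysTick".toList,
         (events.map (fun e => e.2.2 - e.1)).sum) := by
  unfold task_interrupt_ratio_alt
  have hnd : (events.foldl
      (fun (d : PySem.Dict (List Char) Int) e => d.modify e.2.1.toList 0 (· + (e.2.2 - e.1)))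
      PySem.Dict.empty).keys.Nodup := by
    have := PySem.Dict.nodup_keys_foldl_modify_key events (fun e => e.2.1.toList) 0
      (fun _ e => (· + (e.2.2 - e.1))) PySem.Dict.empty (by simp [PySem.Dict.keys_empty])
    simpa using this
  have hkeys : (events.foldl
      (fun (d : PySem.Dict (List Char) Int) e => d.modify e.2.1.toList 0 (· + (e.2.2 - e.1)))
      PySem.Dict.empty).keys = PySem.Set.ofList (events.map (fun e => e.2.1.toList)) := by
    have := PySem.Dict.keys_foldl_modify_key events (fun e => e.2.1.toList) 0
      (fun _ e => (· + (e.2.2 - e.1))) PySem.Dict.empty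
    simpa [PySem.Dict.keys_empty, PySem.Set.update_nil_left] using this
  have hval : (events.foldl
      (fun (d : PySem.Dict (List Char) Int) e => d.modify e.2.1.toList 0 (· + (e.2.2 - e.1)))
      PySem.Dict.empty).values.sum = (events.map (fun e => e.2.2 - e.1)).sum := by
    rw [PySem.Dict.values_eq_map_keys _ hnd 0, hkeys]
    have : (PySem.Set.ofList (events.map (fun e => e.2.1.toList))).map
        (fun k => (events.foldl
          (fun (d : PySem.Dict (List Char) Int) e => d.modify e.2.1.toList 0 (· + (e.2.2 - e.1)))
          PySem.Dict.empty).getD k 0)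
        = (PySem.Set.ofList (events.map (fun e => e.2.1.toList))).map (fun k => pvF events k) := by
      apply List.map_congr_left; intro k _
      rw [getD_fold]; simp [PySem.Dict.getD_empty]
    rw [this]
    exact partition_sum events _ (PySem.Set.nodup_ofList _)
      (fun e he => (PySem.Set.mem_ofList _ _).mpr (List.mem_map_of_mem he))
  simp only [getD_fold, PySem.Dict.getD_empty, hval]
  simp

-- ===== VERDICT (by name: the statement is the Claim_ definition above) =====
theorem task_interrupt_ratio_spec : Claim_equal_task_interrupt_ratio := by
  intro events _
  unfold Spec_task_interrupt_ratio task_interrupt_ratio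
  rw [alt_closed]
  simp only [foldl_pair]
  refine Prod.ext (by ring) (Prod.ext (by ring) (by ring))
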